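-- pv_equiv track=rewrite | github.com/H3LL0U/Phishing_awareness_website | parse_python.py | structure_date_data
-- ===== SOURCE A (Python) =====
-- from collections import defaultdict
--
-- def structure_date_data(_list: list[dict]) -> dict:
--
--     '''
--     takes a list of dictionaries containing the redirect type as the key and the date as teh value and restuctures them
--     as follows:
--
--     Input:
--         _list (list of dict): A list of dictionaries where each dictionary contains a redirect type as the key
--                             and a timestamp as the value.
--                             Example:
--                             [
--                                 {"redirect_type_1": "2025-02-15 19:12:22"},
--                                 {"redirect_type_1": "2025-02-15 19:14:01"},
--                                 {"redirect_type_2": "2025-02-15 19:12:22"}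
--                             ]
--
--     Output:
--     dict: A dictionary where each key is a redirect type and each value is a dictionary where the keys are the
--           dates (with the time set to "00:00") and the values are the counts of occurrences of that date for that
--           specific redirect type.
--           Example output:
--           {
--               "redirect_type_1": {"2025-02-15 19:00:00": 2},
--               "redirect_type_2": {"2025-02-15 19:00:00": 1}
--           }
--     '''
--
--
--     formatted_data = defaultdict(lambda: defaultdict(int))
--
--
--     for entry in _list:
--         for key, value in entry.items():
--             try:
--
--                 date_str = value[:-5] + "00:00"
--
--
--                 formatted_data[key][date_str] += 1
--
--             except KeyboardInterrupt:
--                 raise KeyboardInterrupt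
--             except Exception as e:
--                 continue
--
--
--     return {key: dict(value) for key, value in formatted_data.items()}
-- ===== SOURCE B (Python) =====
-- def structure_date_data(_list: list[dict]) -> dict:
--     # Flatten into (type, bucketed-date) pairs, then brute force: for each
--     # distinct type (first-occurrence order) gather its dates and count each
--     # distinct date with list.count -- no incremental counting accumulator.
--     pairs = [(key, value[:-5] + "00:00")
--              for entry in _list for key, value in entry.items()]
--     result = {}
--     for k in dict.fromkeys(k for k, _ in pairs):
--         dates = [d for kk, d in pairs if kk == k]
--         result[k] = {d: dates.count(d) for d in dict.fromkeys(dates)}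
--     return result
-- ===== Notes on version B (the rewrite author's own statement) =====
-- stated objective: alternative
-- what changed: Replaces A's one-pass nested-defaultdict incremental counting with a brute-force restatement: flatten to (type, date) pairs, then for each distinct type (ordered dedup) gather its dates by a filtering scan and count each distinct date with list.count - no counting accumulator is maintained at all.
import Mathlib
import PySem

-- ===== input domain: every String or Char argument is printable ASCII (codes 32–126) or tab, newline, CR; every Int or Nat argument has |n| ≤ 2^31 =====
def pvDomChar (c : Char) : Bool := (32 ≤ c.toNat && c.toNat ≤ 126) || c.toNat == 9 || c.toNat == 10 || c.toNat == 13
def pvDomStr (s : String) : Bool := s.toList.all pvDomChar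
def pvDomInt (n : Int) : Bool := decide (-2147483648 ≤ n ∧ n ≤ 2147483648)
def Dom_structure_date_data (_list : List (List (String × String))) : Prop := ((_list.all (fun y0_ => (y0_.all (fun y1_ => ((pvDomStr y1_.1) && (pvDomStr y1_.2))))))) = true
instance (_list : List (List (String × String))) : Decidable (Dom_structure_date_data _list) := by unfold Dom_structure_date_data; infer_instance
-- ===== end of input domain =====

-- B drops A's one-pass nested-defaultdict increment loop for a brute-force restatement:
-- flatten to (type, date) pairs, then for each distinct type gather its dates and count
-- each distinct date with list.count (alternative decomposition; no accumulator, not faster).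
-- On str values the slice/concat in A's try block cannot raise, so A is total here.

-- ===== PORT A =====
-- value[:-5] + "00:00"  (this exact expression occurs in both Pythons)
def pvDateKey (v : String) : String := PySem.Str.slice v none (some (-5)) ++ "00:00"

def structure_date_data (_list : List (List (String × String))) : List (String × List (String × Int)) :=
  -- formatted_data = defaultdict(lambda: defaultdict(int)); nested for-loops; the
  -- try body (slice, concat, increment) cannot raise on str values, so the except
  -- arms are dead code here.  Final comprehension {key: dict(value)} keeps order.
  (_list.foldl
      (fun fd entry =>
        entry.foldl
          (fun fd kv =>
            fd.modify kv.1 PySem.Dict.empty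
              (fun inner => inner.modify (pvDateKey kv.2) 0 (· + 1)))
          fd)
      PySem.Dict.empty).items.map (fun p => (p.1, p.2.items))

-- ===== PORT B =====
def structure_date_data_alt (_list : List (List (String × String))) : List (String × List (String × Int)) :=
  -- pairs = [(key, value[:-5] + "00:00") for entry in _list for key, value in entry.items()]
  let pairs := _list.flatMap (fun entry => entry.map (fun kv => (kv.1, pvDateKey kv.2)))
  -- for k in dict.fromkeys(...): dates = [...]; result[k] = {d: dates.count(d) for d in dict.fromkeys(dates)}
  -- (dict.fromkeys = ordered dedup = PySem.List.dedup; result's keys are distinct, so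
  --  the returned dict's items are exactly this map in loop order)
  (PySem.List.dedup (pairs.map Prod.fst)).map (fun k =>
    let dates := (pairs.filter (fun p => p.1 == k)).map Prod.snd
    (k, (PySem.List.dedup dates).map (fun d => (d, (dates.count d : Int)))))

-- ===== PRECONDITION & SPEC =====
def Spec_structure_date_data (_list : List (List (String × String))) (out : List (String × List (String × Int))) : Prop := out = structure_date_data_alt _list
instance (_list : List (List (String × String))) (out : List (String × List (String × Int))) : Decidable (Spec_structure_date_data _list out) := by unfold Spec_structure_date_data; infer_instance

-- ===== CLAIM =====
def Claim_equal_structure_date_data : Prop := ∀ (_list : List (List (String × String))), Dom_structure_date_data _list → Spec_structure_date_data _list (structure_date_data _list)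

-- ===== LEMMAS AND PROOFS =====

-- A's double loop is the single loop over the flattened (key, date) pair list.
lemma pv_A_flatten (L : List (List (String × String))) :
    ∀ init : PySem.Dict String (PySem.Dict String Int),
    L.foldl
        (fun fd entry =>
          entry.foldl
            (fun fd kv =>
              fd.modify kv.1 PySem.Dict.empty
                (fun inner => inner.modify (pvDateKey kv.2) 0 (· + 1)))
            fd)
        init
      = (L.flatMap (fun e => e.map (fun kv => (kv.1, pvDateKey kv.2)))).foldl
          (fun fd p =>
            fd.modify p.1 PySem.Dict.empty
              (fun inner => inner.modify p.2 0 (· + 1)))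
          init := by
  induction L with
  | nil => intro init; simp
  | cons e L ih =>
      intro init
      simp [List.foldl_append, List.foldl_map, ih]

-- reading one key off a modify-keyed fold: only the steps with that key matter
lemma pv_getD_foldl_modify {κ ν α : Type} [BEq κ] [LawfulBEq κ] [DecidableEq κ]
    (l : List α) (key : α → κ) (f : α → ν → ν) (d0 : ν) (k : κ) :
    ∀ d : PySem.Dict κ ν,
    (l.foldl (fun d a => d.modify (key a) d0 (f a)) d).getD k d0
      = (l.filter (fun a => key a == k)).foldl (fun v a => f a v) (d.getD k d0) := by
  induction l with
  | nil => intro d; simp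
  | cons a l ih =>
      intro d
      by_cases h : key a = k
      · simp [h, ih]
      · simp [h, ih, PySem.Dict.getD_modify, Ne.symm h]

-- a dict with Nodup keys is the map of its lookups over its key list
lemma pv_items_eq_map_keys {κ ν : Type} [BEq κ] [LawfulBEq κ]
    (d : PySem.Dict κ ν) (v0 : ν) (hn : d.keys.Nodup) :
    d.items = d.keys.map (fun k => (k, d.getD k v0)) := by
  have hlen : d.items.length = (d.keys.map (fun k => (k, d.getD k v0))).length := by
    simp [PySem.Dict.keys]
  apply List.ext_getElem hlen
  intro i hi hi'
  have hk : i < d.keys.length := by simpa using hi'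
  have hik : d.keys[i] = (d.items[i]).1 := by
    simp [PySem.Dict.keys]
  have hm : (d.items[i].1, d.items[i].2) ∈ d.items := by
    simp only [Prod.mk.eta]; exact List.getElem_mem hi
  have hv : d.getD (d.items[i].1) v0 = d.items[i].2 :=
    PySem.Dict.getD_of_mem_items d hm hn v0
  simp only [List.getElem_map]
  rw [hik, hv]

theorem pv_final (_list : List (List (String × String))) :
    structure_date_data _list = structure_date_data_alt _list := by
  simp only [structure_date_data, structure_date_data_alt]
  rw [pv_A_flatten]
  set pairs := _list.flatMap (fun e => e.map (fun kv => (kv.1, pvDateKey kv.2))) with hpairs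
  set FD := pairs.foldl
      (fun fd p =>
        fd.modify p.1 PySem.Dict.empty
          (fun inner => inner.modify p.2 (0 : Int) (· + 1)))
      PySem.Dict.empty with hFD
  have hnodup : FD.keys.Nodup := by
    rw [hFD]
    exact PySem.Dict.nodup_keys_foldl_modify_key pairs (fun p : String × String => p.1)
      PySem.Dict.empty (fun _ p inner => inner.modify p.2 (0 : Int) (· + 1)) PySem.Dict.empty
      PySem.Dict.nodup_keys_empty
  have hkeys : FD.keys = PySem.Set.ofList (pairs.map Prod.fst) := by
    rw [hFD]
    exact PySem.Dict.keys_foldl_modify_key pairs (fun p : String × String => p.1)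
      PySem.Dict.empty (fun _ p inner => inner.modify p.2 (0 : Int) (· + 1)) PySem.Dict.empty
  have hgetD : ∀ k, FD.getD k PySem.Dict.empty
      = PySem.Dict.counter ((pairs.filter (fun p => p.1 == k)).map Prod.snd) := by
    intro k
    rw [hFD, pv_getD_foldl_modify pairs (fun p : String × String => p.1)
      (fun p inner => inner.modify p.2 (0 : Int) (· + 1)) PySem.Dict.empty k]
    rw [PySem.Dict.counter_eq_foldl, List.foldl_map]
    rfl
  rw [pv_items_eq_map_keys FD PySem.Dict.empty hnodup, List.map_map, hkeys,
      PySem.List.dedup_eq_ofList]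
  apply List.map_congr_left
  intro k _
  simp only [Function.comp]
  rw [hgetD k, PySem.Dict.items_counter, PySem.List.dedup_eq_ofList]

-- ===== VERDICT =====
theorem structure_date_data_spec : Claim_equal_structure_date_data := by
  intro _list _
  exact pv_final _list
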